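-- pv_equiv track=rewrite | github.com/PFrederi/pdf_corrections | app/ui/app_window.py | _slugify_overlay_name
-- ===== SOURCE A (Python) =====
-- def _slugify_overlay_name(name: str) -> str:
--     s = (name or '').strip()
--     if not s:
--         return ''
--     out = []
--     for ch in s:
--         if ch.isalnum():
--             out.append(ch)
--         elif ch in (' ', '-', '_'):
--             out.append('_')
--     v = ''.join(out).strip('_')
--     while '__' in v:
--         v = v.replace('__', '_')
--     return v or ''
-- ===== SOURCE B (Python) =====
-- def _slugify_overlay_name(name: str) -> str:
--     parts = []
--     cur = ''
--     for ch in (name or '').strip():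
--         if ch.isalnum():
--             cur += ch
--         elif ch in (' ', '-', '_'):
--             if cur:
--                 parts.append(cur)
--             cur = ''
--     if cur:
--         parts.append(cur)
--     return '_'.join(parts)
-- ===== Notes on version B (the rewrite author's own statement) =====
-- stated objective: simpler
-- what changed: B replaces A's three-stage pipeline (map chars to a raw string, strip boundary underscores, then a while-loop repeatedly collapsing double underscores) with a single pass that accumulates maximal alphanumeric runs and joins them with single underscores.
import Mathlib
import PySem

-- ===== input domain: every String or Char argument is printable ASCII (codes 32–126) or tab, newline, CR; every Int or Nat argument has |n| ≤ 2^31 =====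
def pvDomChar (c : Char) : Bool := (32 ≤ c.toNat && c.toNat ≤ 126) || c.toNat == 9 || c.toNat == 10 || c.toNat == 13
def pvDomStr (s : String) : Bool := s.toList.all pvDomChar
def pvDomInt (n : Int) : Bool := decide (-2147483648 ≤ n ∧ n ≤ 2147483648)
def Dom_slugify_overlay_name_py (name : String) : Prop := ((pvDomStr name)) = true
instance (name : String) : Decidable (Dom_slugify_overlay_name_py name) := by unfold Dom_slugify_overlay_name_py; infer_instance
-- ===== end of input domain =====

-- B replaces A's map/strip('_')/while-replace('__'→'_') pipeline with a single pass that
-- collects maximal alphanumeric runs and joins them with '_' (objective: simpler).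

-- ===== PORT A =====
-- pvRepUU and the lemmas up to pvReplace_length_lt exist only to justify the termination of
-- the port of A's 'while "__" in v: v = v.replace("__", "_")' loop (cited in decreasing_by).
def pvRepUU : List Char → List Char
  | [] => []
  | c :: t =>
    if c = '_' ∧ t.head? = some '_' then '_' :: pvRepUU t.tail
    else c :: pvRepUU t
termination_by v => v.length
decreasing_by
  all_goals simp [List.length_tail]

theorem pvReplace_go_eq (fuel : Nat) : ∀ (l acc : List Char), l.length ≤ fuel →
    PySem.Chars.replace.go ['_','_'] ['_'] fuel l acc = acc.reverse ++ pvRepUU l := by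
  induction fuel with
  | zero =>
    intro l acc h
    have : l = [] := List.eq_nil_of_length_eq_zero (Nat.le_zero.mp h)
    subst this
    simp [PySem.Chars.replace.go, pvRepUU]
  | succ f ih =>
    intro l acc h
    cases l with
    | nil => simp [PySem.Chars.replace.go, pvRepUU]
    | cons c t =>
      rw [PySem.Chars.replace.go]
      cases t with
      | nil =>
        have hp : (['_','_'] : List Char).isPrefixOf [c] = false := by
          cases hc : c == '_' <;> simp [List.isPrefixOf]
        simp only [hp]
        rw [ih [] (c :: acc) (by simp)]
        simp [pvRepUU]
      | cons c2 t2 =>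
        by_cases hc : c = '_' ∧ c2 = '_'
        · obtain ⟨rfl, rfl⟩ := hc
          have hp : (['_','_'] : List Char).isPrefixOf ('_' :: '_' :: t2) = true := by
            simp [List.isPrefixOf]
          simp only [hp, if_pos, List.length_cons, List.drop_succ_cons, List.drop_zero,
            List.length_nil, List.reverse_cons, List.reverse_nil, List.nil_append]
          rw [show (['_'] ++ acc : List Char) = '_' :: acc from rfl,
            ih t2 ('_' :: acc) (by simp at h ⊢; omega)]
          conv_rhs => rw [pvRepUU]
          simp
        · have hp : (['_','_'] : List Char).isPrefixOf (c :: c2 :: t2) = false := by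
            rcases (not_and_or.mp hc) with h1 | h1 <;>
              simp [List.isPrefixOf] <;> tauto
          simp only [hp]
          rw [ih (c2 :: t2) (c :: acc) (by simp at h ⊢; omega)]
          have hneg : ¬ (c = '_' ∧ (c2 :: t2).head? = some '_') := by simpa using hc
          conv_rhs => rw [pvRepUU]
          rw [if_neg hneg]
          simp

theorem pvReplace_eq_repUU (v : List Char) :
    PySem.Chars.replace v ['_','_'] ['_'] = pvRepUU v := by
  rw [PySem.Chars.replace]
  simp only [List.isEmpty_cons]
  rw [pvReplace_go_eq v.length v [] (le_refl _)]
  simp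

theorem pvRepUU_length_le (v : List Char) : (pvRepUU v).length ≤ v.length := by
  fun_induction pvRepUU v with
  | case1 => simp
  | case2 c t h ih =>
    obtain ⟨rfl, hh⟩ := h
    cases t with
    | nil => simp at hh
    | cons d t' => simp at ih ⊢; omega
  | case3 c t h ih => simp; omega

theorem pvRepUU_length_lt (v : List Char) (h : ['_','_'] <:+: v) :
    (pvRepUU v).length < v.length := by
  fun_induction pvRepUU v with
  | case1 => simp at h
  | case2 c t hc ih =>
    obtain ⟨rfl, hh⟩ := hc
    cases t with
    | nil => simp at hh
    | cons d t' =>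
      have := pvRepUU_length_le t'
      simp at this ⊢
      omega
  | case3 c t hc ih =>
    have ht : ['_','_'] <:+: t := by
      rcases List.infix_cons_iff.mp h with hpre | hinf
      · exfalso
        rcases hpre with ⟨s, hs⟩
        cases t with
        | nil => simp at hs
        | cons d t' =>
          simp at hs
          exact hc ⟨hs.1.symm, by simp [hs.2.1.symm]⟩
      · exact hinf
    have := ih ht
    simp at this ⊢
    omega

theorem pvReplace_length_lt (v : List Char) (h : PySem.Chars.isIn ['_','_'] v = true) :
    (PySem.Chars.replace v ['_','_'] ['_']).length < v.length := by
  rw [pvReplace_eq_repUU]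
  exact pvRepUU_length_lt v ((PySem.Chars.isIn_iff_infix _ _).mp h)

def pvCollapseA (v : List Char) : List Char :=
  if _hin : PySem.Chars.isIn ['_','_'] v = true then
    pvCollapseA (PySem.Chars.replace v ['_','_'] ['_'])
  else v
termination_by v.length
decreasing_by exact pvReplace_length_lt v _hin

def slugify_overlay_name_py (name : String) : String :=
  let s := PySem.Str.strip name
  if s = "" then ""
  else
    let out := s.toList.foldl (fun out ch =>
      if PySem.Chars.isalnum ch then out ++ [ch]
      else if ch = ' ' ∨ ch = '-' ∨ ch = '_' then out ++ ['_']
      else out) ([] : List Char)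
    let v := PySem.Chars.stripChars out ['_']
    String.ofList (pvCollapseA v)

-- ===== PORT B =====
def slugify_overlay_name_py_alt (name : String) : String :=
  let r := (PySem.Str.strip name).toList.foldl
    (fun (st : List (List Char) × List Char) ch =>
      if PySem.Chars.isalnum ch then (st.1, st.2 ++ [ch])
      else if ch = ' ' ∨ ch = '-' ∨ ch = '_' then
        (if st.2 ≠ [] then st.1 ++ [st.2] else st.1, [])
      else st) (([], []) : List (List Char) × List Char)
  let parts := if r.2 ≠ [] then r.1 ++ [r.2] else r.1
  String.ofList (PySem.Chars.join ['_'] parts)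

-- ===== PRECONDITION & SPEC =====
def Spec_slugify_overlay_name_py (name : String) (out : String) : Prop := out = slugify_overlay_name_py_alt name
instance (name : String) (out : String) : Decidable (Spec_slugify_overlay_name_py name out) := by unfold Spec_slugify_overlay_name_py; infer_instance

-- ===== CLAIM (what is proved, stated in full; the proofs are below) =====
def Claim_equal_slugify_overlay_name_py : Prop := ∀ (name : String), Dom_slugify_overlay_name_py name → Spec_slugify_overlay_name_py name (slugify_overlay_name_py name)

-- ===== LEMMAS AND PROOFS =====
def pvSquash : List Char → List Char
  | [] => []
  | c :: t => if c = '_' ∧ t.head? = some '_' then pvSquash t else c :: pvSquash t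

theorem pvRepUU_head? (v : List Char) : (pvRepUU v).head? = v.head? := by
  fun_induction pvRepUU v with
  | case1 => rfl
  | case2 c t h ih => simp [h.1]
  | case3 c t h ih => simp

theorem pvSquash_repUU (v : List Char) : pvSquash (pvRepUU v) = pvSquash v := by
  fun_induction pvRepUU v with
  | case1 => rfl
  | case2 c t h ih =>
    obtain ⟨rfl, hh⟩ := h
    obtain ⟨t2, rfl⟩ : ∃ t2, t = '_' :: t2 := by
      cases t with
      | nil => simp at hh
      | cons d t' => simp at hh; exact ⟨t', by rw [hh]⟩
    simp only [List.tail_cons] at ih ⊢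
    by_cases h2 : t2.head? = some '_'
    · rw [pvSquash, if_pos ⟨rfl, (pvRepUU_head? t2).trans h2⟩, ih,
        pvSquash, if_pos (by simp), pvSquash, if_pos ⟨rfl, h2⟩]
    · have hn : ¬ ('_' = '_' ∧ (pvRepUU t2).head? = some '_') := by
        rw [pvRepUU_head? t2]; tauto
      rw [pvSquash, if_neg hn, ih, show pvSquash ('_' :: '_' :: t2) = pvSquash ('_' :: t2) from by rw [pvSquash, if_pos (by simp)],
        pvSquash, if_neg (by tauto)]
  | case3 c t h ih =>
    have hh : ¬ (c = '_' ∧ (pvRepUU t).head? = some '_') := by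
      rw [pvRepUU_head? t]; exact h
    rw [pvSquash, pvSquash, if_neg hh, if_neg h, ih]

theorem pvSquash_of_not_infix (v : List Char) (h : ¬ ['_','_'] <:+: v) : pvSquash v = v := by
  induction v with
  | nil => rfl
  | cons c t ih =>
    have hni : ¬ ['_','_'] <:+: t := fun ht => h (ht.trans (List.suffix_cons c t).isInfix)
    have hnp : ¬ (c = '_' ∧ t.head? = some '_') := by
      rintro ⟨rfl, hh⟩
      cases t with
      | nil => simp at hh
      | cons d t' =>
        simp at hh
        exact h ⟨[], t', by simp [hh]⟩
    rw [pvSquash, if_neg hnp, ih hni]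

theorem pvCollapseA_eq_squash (v : List Char) : pvCollapseA v = pvSquash v := by
  fun_induction pvCollapseA v with
  | case1 v h ih =>
    rw [ih, pvReplace_eq_repUU, pvSquash_repUU]
  | case2 v h =>
    rw [pvSquash_of_not_infix]
    intro hi
    exact h ((PySem.Chars.isIn_iff_infix _ _).mpr hi)

def pvRuns : List Char → List (List Char)
  | [] => []
  | c :: t =>
    if c = '_' then pvRuns t
    else (c :: t.takeWhile (· ≠ '_')) :: pvRuns (t.dropWhile (· ≠ '_'))
termination_by v => v.length
decreasing_by
  · simp
  · simp only [List.length_cons]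
    exact Nat.lt_succ_of_le (List.length_dropWhile_le _ _)

def pvRstrip (v : List Char) : List Char :=
  (v.reverse.dropWhile (fun c => c == '_')).reverse

theorem pvContains_underscore (c : Char) : (['_'] : List Char).contains c = (c == '_') := by
  cases hc : c == '_' <;> simp_all

theorem pvStripChars_eq (m : List Char) :
    PySem.Chars.stripChars m ['_'] = pvRstrip (m.dropWhile (fun c => c == '_')) := by
  rw [PySem.Chars.stripChars, pvRstrip]
  have hp : (fun c => (['_'] : List Char).contains c) = (fun c => c == '_') := by
    funext c; exact pvContains_underscore c
  rw [hp]

theorem pvSquash_no_underscore (v : List Char) (h : ∀ c ∈ v, c ≠ '_') : pvSquash v = v := by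
  induction v with
  | nil => rfl
  | cons c t ih =>
    rw [pvSquash, if_neg, ih (fun d hd => h d (List.mem_cons_of_mem c hd))]
    rintro ⟨hc, -⟩
    exact h c List.mem_cons_self hc

theorem pvHead_dropWhile {p : Char → Bool} (l : List Char) (a : Char)
    (h : (l.dropWhile p).head? = some a) : p a = false := by
  induction l with
  | nil => simp at h
  | cons c t ih =>
    rw [List.dropWhile_cons] at h
    split at h
    · exact ih h
    · simp at h; subst h; simp_all

theorem pvSquash_boundary (x u y : List Char) (hx : ∀ c ∈ x, c ≠ '_')
    (hu : ∀ c ∈ u, c = '_') (hne : u ≠ []) (hy : y.head? ≠ some '_') :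
    pvSquash (x ++ u ++ y) = x ++ '_' :: pvSquash y := by
  induction x with
  | nil =>
    induction u with
    | nil => simp at hne
    | cons e u' ihu =>
      have he : e = '_' := hu e List.mem_cons_self
      subst he
      cases u' with
      | nil =>
        simp only [List.nil_append, List.singleton_append]
        rw [pvSquash, if_neg (by rintro ⟨-, hh⟩; exact hy hh)]
      | cons e2 u2 =>
        have he2 : e2 = '_' := hu e2 (by simp)
        subst he2
        simp only [List.nil_append] at ihu ⊢
        rw [List.cons_append, pvSquash, if_pos ⟨rfl, by simp⟩]
        exact ihu (fun d hd => hu d (List.mem_cons_of_mem _ hd)) (by simp)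
  | cons e x' ihx =>
    have he : e ≠ '_' := hx e List.mem_cons_self
    rw [List.cons_append, List.cons_append, pvSquash, if_neg (by rintro ⟨hc, -⟩; exact he hc)]
    rw [ihx (fun d hd => hx d (List.mem_cons_of_mem _ hd))]
    simp

theorem pvRstrip_no_underscore (v : List Char) (h : ∀ c ∈ v, c ≠ '_') : pvRstrip v = v := by
  rw [pvRstrip, List.dropWhile_eq_self_iff.mpr, List.reverse_reverse]
  intro hx
  have hm : v.reverse[0] ∈ v := by
    exact List.mem_reverse.mp (List.getElem_mem hx)
  simpa using h _ hm

theorem pvRstrip_nil_all (v : List Char) (h : pvRstrip v = []) : ∀ c ∈ v, c = '_' := by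
  rw [pvRstrip, List.reverse_eq_nil_iff] at h
  intro c hc
  have := List.dropWhile_eq_nil_iff.mp h c (by simpa using hc)
  simpa using this

theorem pvRstrip_append_all (x y : List Char) (h : ∀ c ∈ y, c = '_') :
    pvRstrip (x ++ y) = pvRstrip x := by
  rw [pvRstrip, pvRstrip, List.reverse_append, List.dropWhile_append]
  have : y.reverse.dropWhile (fun c => c == '_') = [] :=
    List.dropWhile_eq_nil_iff.mpr (fun c hc => by simp [h c (by simpa using hc)])
  simp [this]

theorem pvRstrip_append_keep (x y : List Char) (h : pvRstrip y ≠ []) :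
    pvRstrip (x ++ y) = x ++ pvRstrip y := by
  have h' : y.reverse.dropWhile (fun c => c == '_') ≠ [] := by
    intro hn; exact h (by rw [pvRstrip, hn, List.reverse_nil])
  rw [pvRstrip, pvRstrip, List.reverse_append, List.dropWhile_append]
  simp only [List.isEmpty_iff, if_neg h']
  rw [List.reverse_append, List.reverse_reverse]

theorem pvRstrip_ne_nil (y : List Char) (d : Char) (hd : y.head? = some d) (h : d ≠ '_') :
    pvRstrip y ≠ [] := by
  intro hn
  cases y with
  | nil => simp at hd
  | cons e t =>
    simp at hd
    subst hd
    exact h (pvRstrip_nil_all _ hn _ List.mem_cons_self)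

theorem pvRstrip_prefix (y : List Char) : pvRstrip y <+: y := by
  have := List.dropWhile_suffix (l := y.reverse) (p := fun c => c == '_')
  have h2 := List.reverse_prefix.mpr this
  simpa [pvRstrip] using h2

theorem pvPrefix_head? {x y : List Char} (h : x <+: y) (hne : x ≠ []) : x.head? = y.head? := by
  obtain ⟨s, rfl⟩ := h
  cases x with
  | nil => simp at hne
  | cons c t => simp

theorem pvRuns_ldrop (v : List Char) :
    pvRuns (v.dropWhile (fun c => c == '_')) = pvRuns v := by
  induction v with
  | nil => rfl
  | cons c t ih =>
    by_cases hc : c = '_'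
    · subst hc
      rw [List.dropWhile_cons_of_pos (by simp), ih, pvRuns, if_pos rfl]
    · rw [List.dropWhile_cons_of_neg (by simpa using hc)]

theorem pvJoin_cons (x : List Char) (L : List (List Char)) (h : L ≠ []) :
    PySem.Chars.join ['_'] (x :: L) = x ++ '_' :: PySem.Chars.join ['_'] L := by
  cases L with
  | nil => simp at h
  | cons y L' =>
    rw [PySem.Chars.join, PySem.Chars.join]
    simp [List.intercalate]

theorem pvMain (n : Nat) : ∀ m : List Char, m.length ≤ n → m.head? ≠ some '_' →
    pvSquash (pvRstrip m) = PySem.Chars.join ['_'] (pvRuns m) := by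
  induction n with
  | zero =>
    intro m hm _
    have : m = [] := List.eq_nil_of_length_eq_zero (Nat.le_zero.mp hm)
    subst this
    simp [pvRstrip, pvSquash, pvRuns, PySem.Chars.join, List.intercalate]
  | succ n ih =>
    intro m hm hh
    cases m with
    | nil => simp [pvRstrip, pvSquash, pvRuns, PySem.Chars.join, List.intercalate]
    | cons c t =>
      have hc : c ≠ '_' := by intro hc; exact hh (by simp [hc])
      set a := t.takeWhile (· ≠ '_') with ha
      set b := t.dropWhile (· ≠ '_') with hb
      have hab : t = a ++ b := (List.takeWhile_append_dropWhile).symm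
      have hx : ∀ d ∈ c :: a, d ≠ '_' := by
        intro d hd
        rcases List.mem_cons.mp hd with rfl | hd
        · exact hc
        · simpa using List.mem_takeWhile_imp hd
      have hruns : pvRuns (c :: t) = (c :: a) :: pvRuns b := by
        rw [pvRuns, if_neg hc]
      cases hbe : b with
      | nil =>
        have hmx : c :: t = c :: a := by rw [hab, hbe, List.append_nil]
        rw [hruns, hbe, hmx, pvRstrip_no_underscore _ hx, pvSquash_no_underscore _ hx]
        simp [pvRuns, PySem.Chars.join, List.intercalate]
      | cons d b' =>
        have hd : d = '_' := by
          have := pvHead_dropWhile (p := fun x => decide (x ≠ '_')) t d (by rw [← hb, hbe]; rfl)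
          simpa using this
        subst hd
        -- split b into its leading underscores u and the rest b2
        set u := b.takeWhile (fun x => x == '_') with hu
        set b2 := b.dropWhile (fun x => x == '_') with hb2
        have hub : b = u ++ b2 := (List.takeWhile_append_dropWhile).symm
        have hu_all : ∀ e ∈ u, e = '_' := by
          intro e he
          simpa using List.mem_takeWhile_imp he
        have hu_ne : u ≠ [] := by
          rw [hu, hbe]
          simp
        have hb2h : b2.head? ≠ some '_' := by
          intro hsome
          have := pvHead_dropWhile (p := fun x => x == '_') b '_' (by rw [← hb2]; exact hsome)
          simp at this
        have hruns2 : pvRuns b = pvRuns b2 := by rw [hb2, pvRuns_ldrop]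
        cases hb2e : b2 with
        | nil =>
          have hball : ∀ e ∈ b, e = '_' := by
            rw [hub, hb2e, List.append_nil]; exact hu_all
          rw [hruns, hruns2, hb2e]
          have hsp : c :: t = (c :: a) ++ b := by rw [hab, List.cons_append]
          rw [hsp, pvRstrip_append_all _ _ hball, pvRstrip_no_underscore _ hx,
            pvSquash_no_underscore _ hx]
          simp [pvRuns, PySem.Chars.join, List.intercalate]
        | cons e b2' =>
          have he : e ≠ '_' := by
            intro he; exact hb2h (by rw [hb2e, he]; rfl)
          have hrb2 : pvRstrip b2 ≠ [] := pvRstrip_ne_nil b2 e (by rw [hb2e]; rfl) he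
          have hsplit : c :: t = ((c :: a) ++ u) ++ b2 := by
            rw [List.append_assoc, ← hub, List.cons_append, ← hab]
          have hrstr : pvRstrip (c :: t) = (c :: a) ++ u ++ pvRstrip b2 := by
            rw [hsplit, pvRstrip_append_keep _ _ hrb2, List.append_assoc]
          have hlen : b2.length ≤ n := by
            have h1 : b.length ≤ t.length := by rw [hb]; exact List.length_dropWhile_le _ _
            have h2 : b2.length ≤ b.length := by rw [hb2]; exact List.length_dropWhile_le _ _
            have h3 : b.length = b'.length + 1 := by rw [hbe]; rfl
            have h4 : b2.length ≤ b'.length + 1 := by omega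
            have h5 : b2.length = b2'.length + 1 := by rw [hb2e]; rfl
            have h6 : b2'.length + 1 ≤ b'.length + 1 := by
              have : b2.length ≤ b.length := h2
              omega
            simp at hm
            omega
          have hIH := ih b2 hlen hb2h
          have hbhead : (pvRstrip b2).head? ≠ some '_' := by
            rw [pvPrefix_head? (pvRstrip_prefix b2) hrb2]
            exact hb2h
          rw [hrstr, pvSquash_boundary _ _ _ hx hu_all hu_ne hbhead, hIH, hruns, hruns2,
            pvJoin_cons _ _ (by rw [hb2e, pvRuns, if_neg he]; simp)]

theorem pvASide (m : List Char) :
    pvSquash (PySem.Chars.stripChars m ['_']) = PySem.Chars.join ['_'] (pvRuns m) := by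
  rw [pvStripChars_eq]
  have hh : (m.dropWhile (fun c => c == '_')).head? ≠ some '_' := by
    intro hs
    have := pvHead_dropWhile (p := fun c => c == '_') m '_' hs
    simp at this
  rw [pvMain (m.dropWhile (fun c => c == '_')).length _ (le_refl _) hh, pvRuns_ldrop]

def pvRfn : List Char → List Char → List (List Char)
  | cur, [] => if cur = [] then [] else [cur]
  | cur, c :: t =>
    if c = '_' then (if cur = [] then pvRfn [] t else cur :: pvRfn [] t)
    else pvRfn (cur ++ [c]) t

theorem pvRfn_spec (m : List Char) :
    pvRfn [] m = pvRuns m ∧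
    ∀ cur, cur ≠ [] →
      pvRfn cur m = (cur ++ m.takeWhile (· ≠ '_')) :: pvRuns (m.dropWhile (· ≠ '_')) := by
  induction m with
  | nil =>
    constructor
    · simp [pvRfn, pvRuns]
    · intro cur hcur
      simp [pvRfn, pvRuns, hcur]
  | cons c t ih =>
    obtain ⟨ih1, ih2⟩ := ih
    by_cases hc : c = '_'
    · subst hc
      constructor
      · rw [pvRfn, if_pos rfl, if_pos rfl, ih1, pvRuns, if_pos rfl]
      · intro cur hcur
        rw [pvRfn, if_pos rfl, if_neg hcur, ih1]
        rw [List.takeWhile_cons_of_neg (by simp), List.dropWhile_cons_of_neg (by simp)]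
        rw [pvRuns, if_pos rfl, List.append_nil]
    · constructor
      · rw [pvRfn, if_neg hc, List.nil_append, ih2 [c] (by simp)]
        rw [pvRuns, if_neg hc]
        simp
      · intro cur hcur
        rw [pvRfn, if_neg hc, ih2 (cur ++ [c]) (by simp)]
        rw [List.takeWhile_cons_of_pos (by simpa using hc), List.dropWhile_cons_of_pos (by simpa using hc)]
        simp

def pvF (ch : Char) : List Char :=
  if PySem.Chars.isalnum ch then [ch]
  else if ch = ' ' ∨ ch = '-' ∨ ch = '_' then ['_']
  else []

theorem pvAlnum_ne_underscore (c : Char) (h : PySem.Chars.isalnum c = true) : c ≠ '_' := by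
  rintro rfl
  exact absurd h (by decide)

theorem pvFoldA (l : List Char) : ∀ (init : List Char),
    l.foldl (fun out ch =>
      if PySem.Chars.isalnum ch then out ++ [ch]
      else if ch = ' ' ∨ ch = '-' ∨ ch = '_' then out ++ ['_']
      else out) init = init ++ l.flatMap pvF := by
  induction l with
  | nil => simp
  | cons c t ih =>
    intro init
    rw [List.foldl_cons, List.flatMap_cons, ih]
    by_cases h1 : PySem.Chars.isalnum c = true
    · rw [if_pos h1, pvF, if_pos h1, List.append_assoc]
    · rw [if_neg h1, pvF, if_neg h1]
      by_cases h2 : c = ' ' ∨ c = '-' ∨ c = '_'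
      · rw [if_pos h2, if_pos h2, List.append_assoc]
      · rw [if_neg h2, if_neg h2]
        simp

def pvStepR (st : List (List Char) × List Char) (c : Char) : List (List Char) × List Char :=
  if c = '_' then (if st.2 ≠ [] then st.1 ++ [st.2] else st.1, [])
  else (st.1, st.2 ++ [c])

theorem pvFoldB (l : List Char) : ∀ (st : List (List Char) × List Char),
    l.foldl (fun (st : List (List Char) × List Char) ch =>
      if PySem.Chars.isalnum ch then (st.1, st.2 ++ [ch])
      else if ch = ' ' ∨ ch = '-' ∨ ch = '_' then
        (if st.2 ≠ [] then st.1 ++ [st.2] else st.1, [])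
      else st) st = (l.flatMap pvF).foldl pvStepR st := by
  induction l with
  | nil => simp
  | cons c t ih =>
    intro st
    rw [List.foldl_cons, List.flatMap_cons, List.foldl_append, ih]
    congr 1
    by_cases h1 : PySem.Chars.isalnum c = true
    · rw [if_pos h1, pvF, if_pos h1, List.foldl_cons, List.foldl_nil, pvStepR,
        if_neg (pvAlnum_ne_underscore c h1)]
    · rw [if_neg h1, pvF, if_neg h1]
      by_cases h2 : c = ' ' ∨ c = '-' ∨ c = '_'
      · rw [if_pos h2, if_pos h2, List.foldl_cons, List.foldl_nil, pvStepR, if_pos rfl]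
      · rw [if_neg h2, if_neg h2, List.foldl_nil]

theorem pvFoldR (m : List Char) : ∀ (ps : List (List Char)) (cur : List Char),
    (if (m.foldl pvStepR (ps, cur)).2 ≠ [] then
      (m.foldl pvStepR (ps, cur)).1 ++ [(m.foldl pvStepR (ps, cur)).2]
    else (m.foldl pvStepR (ps, cur)).1) = ps ++ pvRfn cur m := by
  induction m with
  | nil =>
    intro ps cur
    by_cases hc : cur = []
    · subst hc; simp [pvRfn]
    · simp [pvRfn, hc]
  | cons c t ih =>
    intro ps cur
    rw [List.foldl_cons]
    by_cases hc : c = '_'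
    · subst hc
      rw [show pvStepR (ps, cur) '_' = (if cur ≠ [] then ps ++ [cur] else ps, []) from rfl]
      by_cases hcur : cur = []
      · subst hcur
        rw [if_neg (show ¬(([] : List Char) ≠ []) by simp)]
        rw [ih, pvRfn, if_pos rfl, if_pos rfl]
      · rw [if_pos hcur]
        rw [ih, pvRfn, if_pos rfl, if_neg hcur, List.append_assoc, List.singleton_append]
    · rw [show pvStepR (ps, cur) c = (ps, cur ++ [c]) from by rw [pvStepR, if_neg hc]]
      rw [ih, pvRfn, if_neg hc]

theorem pvFinal (name : String) :
    slugify_overlay_name_py name = slugify_overlay_name_py_alt name := by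
  rw [slugify_overlay_name_py, slugify_overlay_name_py_alt]
  simp only []
  by_cases hs : PySem.Str.strip name = ""
  · rw [if_pos hs, hs]
    simp [PySem.Chars.join, List.intercalate]
  · rw [if_neg hs]
    rw [pvFoldA, List.nil_append, pvCollapseA_eq_squash, pvASide]
    rw [pvFoldB]
    have := pvFoldR ((PySem.Str.strip name).toList.flatMap pvF) [] []
    rw [List.nil_append] at this
    rw [this, (pvRfn_spec _).1]

-- ===== VERDICT (by name: the statement is the Claim_ definition above) =====
theorem slugify_overlay_name_py_spec : Claim_equal_slugify_overlay_name_py :=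
  fun name _ => pvFinal name
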